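-- pv_equiv track=rewrite | github.com/jwesheath/dailyprogrammer | 228hard/golomb.py | check
-- ===== SOURCE A (Python) =====
-- import itertools
--
-- def check(mark_combo):
--     diffs = set()
--     for pair in itertools.combinations(mark_combo, 2):
--         diff = abs(pair[0] - pair[1])
--         if diff in diffs:
--             return False
--         diffs.add(diff)
--     return True
-- ===== SOURCE B (Python) =====
-- import itertools
--
-- def check(mark_combo):
--     diffs = sorted(abs(a - b) for a, b in itertools.combinations(mark_combo, 2))
--     return all(x != y for x, y in zip(diffs, diffs[1:]))
-- ===== Notes on version B (the rewrite author's own statement) =====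
-- stated objective: alternative
-- what changed: B sorts the list of pairwise absolute differences and checks that no two adjacent sorted entries are equal, replacing A's incremental hash-set membership test with early return by a sort-then-adjacent-scan.
import Mathlib
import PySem

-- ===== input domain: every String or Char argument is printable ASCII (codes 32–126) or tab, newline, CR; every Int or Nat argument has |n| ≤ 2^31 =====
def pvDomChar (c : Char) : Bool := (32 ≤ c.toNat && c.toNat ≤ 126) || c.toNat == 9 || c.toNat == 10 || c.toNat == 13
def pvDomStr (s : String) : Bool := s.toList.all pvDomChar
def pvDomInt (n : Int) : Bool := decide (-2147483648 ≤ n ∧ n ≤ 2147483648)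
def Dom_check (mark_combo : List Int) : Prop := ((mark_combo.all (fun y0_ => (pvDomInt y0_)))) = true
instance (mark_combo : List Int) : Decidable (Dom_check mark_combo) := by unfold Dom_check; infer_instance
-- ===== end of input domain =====

-- B sorts the pairwise differences and scans adjacent entries for an equal pair,
-- instead of A's incremental seen-set with early return; objective: alternative.

-- ===== PORT A =====
-- itertools.combinations(xs, 2), in Python's order
def combs2 : List Int → List (Int × Int)
  | [] => []
  | x :: xs => xs.map (fun y => (x, y)) ++ combs2 xs

-- A's loop: seen-set accumulator, early return False on a repeated diff
def checkLoop : List (Int × Int) → PySem.Set Int → Bool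
  | [], _ => true
  | p :: ps, diffs =>
    let diff := |p.1 - p.2|
    if PySem.Set.contains diffs diff then false
    else checkLoop ps (PySem.Set.add diffs diff)

def check (mark_combo : List Int) : Bool :=
  checkLoop (combs2 mark_combo) PySem.Set.empty

-- ===== PORT B =====
def check_alt (mark_combo : List Int) : Bool :=
  let diffs := PySem.List.sorted ((combs2 mark_combo).map (fun p => |p.1 - p.2|)) (fun x => x) false
  -- all(x != y for x, y in zip(diffs, diffs[1:]))
  (diffs.zip (PySem.List.slice diffs (some 1) none)).all (fun p => p.1 != p.2)

-- ===== PRECONDITION & SPEC =====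
def Spec_check (mark_combo : List Int) (out : Bool) : Prop := out = check_alt mark_combo
instance (mark_combo : List Int) (out : Bool) : Decidable (Spec_check mark_combo out) := by unfold Spec_check; infer_instance

-- ===== CLAIM (what is proved, stated in full; the proofs are below) =====
def Claim_equal_check : Prop := ∀ (mark_combo : List Int), Dom_check mark_combo → Spec_check mark_combo (check mark_combo)

-- ===== LEMMAS AND PROOFS =====

-- A's loop returns true iff the seen-set together with the remaining diffs has no duplicate
theorem checkLoop_true_iff (ps : List (Int × Int)) (s : PySem.Set Int) (hs : s.Nodup) :
    checkLoop ps s = true ↔ (s ++ ps.map (fun p => |p.1 - p.2|)).Nodup := by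
  induction ps generalizing s with
  | nil => simp [checkLoop, hs]
  | cons p ps ih =>
    simp only [checkLoop, List.map]
    by_cases hm : |p.1 - p.2| ∈ s
    · have hc : PySem.Set.contains s (|p.1 - p.2|) = true := by
        unfold PySem.Set.contains; simpa using hm
      rw [if_pos hc]
      constructor
      · intro h; cases h
      · intro h
        exfalso
        rcases (List.nodup_append.mp h) with ⟨_, _, hdisj⟩
        exact hdisj _ hm _ (by simp) rfl
    · have hc : ¬ PySem.Set.contains s (|p.1 - p.2|) = true := by
        unfold PySem.Set.contains; simpa using hm
      rw [if_neg hc]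
      have hadd : PySem.Set.add s (|p.1 - p.2|) = s ++ [|p.1 - p.2|] := by
        simp [PySem.Set.add, hm]
      have hnd : (PySem.Set.add s (|p.1 - p.2|)).Nodup := by
        rw [hadd, List.nodup_append]
        refine ⟨hs, List.nodup_singleton _, ?_⟩
        intro a ha b hb
        simp only [List.mem_singleton] at hb
        subst hb
        rintro rfl
        exact hm ha
      rw [ih _ hnd, hadd, List.append_assoc, List.singleton_append]

-- the adjacent-pair scan is Chain' (· ≠ ·)
theorem zip_tail_all_iff (l : List Int) :
    ((l.zip l.tail).all (fun p => p.1 != p.2)) = true ↔ List.IsChain (· ≠ ·) l := by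
  induction l with
  | nil => simp
  | cons a t ih =>
    cases t with
    | nil => simp
    | cons b t' =>
      simp only [List.tail_cons, List.zip_cons_cons, List.all_cons, Bool.and_eq_true,
        List.isChain_cons_cons]
      rw [← ih]
      simp [List.tail_cons]

-- on a non-decreasing list, no equal adjacent pair ⟺ no duplicate at all
theorem chain'_ne_iff_nodup (l : List Int) (h : l.Pairwise (· ≤ ·)) :
    List.IsChain (· ≠ ·) l ↔ l.Nodup := by
  induction l with
  | nil => simp
  | cons a t ih =>
    rcases List.pairwise_cons.mp h with ⟨hle, ht⟩
    cases t with
    | nil => simp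
    | cons b t' =>
      rcases List.pairwise_cons.mp ht with ⟨hble, _⟩
      rw [List.isChain_cons_cons, List.nodup_cons, ih ht]
      constructor
      · rintro ⟨hab, hnd⟩
        refine ⟨?_, hnd⟩
        intro hmem
        rcases List.mem_cons.mp hmem with rfl | hmem'
        · exact hab rfl
        · have h1 : a ≤ b := hle b (by simp)
          have h2 : b ≤ a := hble a hmem'
          exact hab (le_antisymm h1 h2)
      · rintro ⟨hnm, hnd⟩
        exact ⟨fun hab => hnm (by simp [hab]), hnd⟩

-- ===== VERDICT (by name: the statement is the Claim_ definition above) =====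
theorem check_spec : Claim_equal_check := by
  intro xs _
  unfold Spec_check check check_alt
  set ds := (combs2 xs).map (fun p => |p.1 - p.2|) with hds
  set sd := PySem.List.sorted ds (fun x => x) false with hsd
  have hperm : sd.Perm ds := PySem.List.sorted_perm ds (fun x => x) false
  have hpw : sd.Pairwise (· ≤ ·) := by
    have := PySem.List.sorted_pairwise ds (fun x => x)
    simpa using this
  simp only [PySem.List.slice_from_one]
  have hA : check xs = true ↔ ds.Nodup := by
    unfold check
    rw [checkLoop_true_iff _ _ (by simp [PySem.Set.empty])]
    simp [PySem.Set.empty, hds]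
  have hB : ((sd.zip sd.tail).all (fun p => p.1 != p.2)) = true ↔ ds.Nodup := by
    rw [zip_tail_all_iff, chain'_ne_iff_nodup _ hpw]
    exact hperm.nodup_iff
  have : check xs = ((sd.zip sd.tail).all (fun p => p.1 != p.2)) :=
    Bool.eq_iff_iff.mpr (hA.trans hB.symm)
  simpa [check] using this
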